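-- pv_equiv track=rewrite | github.com/pypi-data/pypi-mirror-168 | packages/kdmt/kdmt-1.0.14-py2.py3-none-any.whl/kdmt/sequences.py | _get_all_dimensions
-- ===== SOURCE A (Python) =====
-- from typing import Sized
--
-- def _get_all_dimensions(batch, level: int = 0, res = None):
--     """Return all presented element sizes of each dimension.
--
--     Args:
--         batch: Data array.
--         level: Recursion level.
--         res: List containing element sizes of each dimension.
--
--     Return:
--         List, i-th element of which is list containing all presented sized of batch's i-th dimension.
--
--     Examples:
--         >>> x = [[[1], [2, 3]], [[4], [5, 6, 7], [8, 9]]]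
--         >>> _get_all_dimensions(x)
--         [[2], [2, 3], [1, 2, 1, 3, 2]]
--
--     """
--     if not level:
--         res = [[len(batch)]]
--     if len(batch) and isinstance(batch[0], Sized) and not isinstance(batch[0], str):
--         level += 1
--         if len(res) <= level:
--             res.append([])
--         for item in batch:
--             res[level].append(len(item))
--             _get_all_dimensions(item, level, res)
--     return res
-- ===== SOURCE B (Python) =====
-- from typing import Sized
--
-- def _get_all_dimensions(batch, level=0, res=None):
--     """Iterative level-order (BFS) version: one frontier per dimension instead of recursion."""
--     if not level:
--         res = [[len(batch)]]
--     frontier = [batch]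
--     lv = level
--     while frontier:
--         nxt = []
--         for node in frontier:
--             if len(node) and isinstance(node[0], Sized) and not isinstance(node[0], str):
--                 if len(res) <= lv + 1:
--                     res.append([])
--                 for item in node:
--                     res[lv + 1].append(len(item))
--                     nxt.append(item)
--         frontier = nxt
--         lv += 1
--     return res
-- ===== Notes on version B (the rewrite author's own statement) =====
-- stated objective: alternative
-- what changed: Replaces the depth-first recursion with an iterative level-order (BFS) traversal that keeps an explicit frontier and fills one res bucket per while-pass instead of interleaving the dimensions' writes.
-- outside the precondition, e.g. on _get_all_dimensions([[[1]]], -1, [[9]]): A returns [[9, 1]], B returns [[9, 1], [1]]; on _get_all_dimensions([[[2, 2]], []], -2, [[7]]): A returns [[7, 1, 2, 0]], B returns [[7, 1, 0, 2]]; on _get_all_dimensions([], 1, None): A returns None, B returns None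
import Mathlib
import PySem

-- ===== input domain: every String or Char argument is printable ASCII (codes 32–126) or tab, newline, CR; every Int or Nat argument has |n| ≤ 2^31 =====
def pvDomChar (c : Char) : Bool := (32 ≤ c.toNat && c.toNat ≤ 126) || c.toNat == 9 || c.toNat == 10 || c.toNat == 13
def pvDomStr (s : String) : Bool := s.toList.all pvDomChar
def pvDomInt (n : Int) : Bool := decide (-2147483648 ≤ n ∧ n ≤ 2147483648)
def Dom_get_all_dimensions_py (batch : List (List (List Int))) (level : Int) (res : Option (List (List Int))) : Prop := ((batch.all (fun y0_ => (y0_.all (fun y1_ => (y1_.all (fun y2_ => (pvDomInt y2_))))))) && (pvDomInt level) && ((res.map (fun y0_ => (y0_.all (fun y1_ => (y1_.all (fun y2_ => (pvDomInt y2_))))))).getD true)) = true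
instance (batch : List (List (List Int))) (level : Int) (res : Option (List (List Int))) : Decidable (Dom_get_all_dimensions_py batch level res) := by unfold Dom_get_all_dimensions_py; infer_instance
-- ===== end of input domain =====

-- B replaces A's recursion by an iterative level-order (BFS) traversal with an explicit frontier
-- (objective: alternative decomposition, same cost).  Both A and B mutate a caller-supplied `res`
-- in place when level ≠ 0; the equivalence proved here is about the RETURN value only.

-- ===== PORT A =====

-- `if len(res) <= level: res.append([])`
def pyEnsure (res : List (List Int)) (L : Int) : List (List Int) :=
  if (res.length : Int) ≤ L then res ++ [[]] else res

-- `res[L].append(v)` : IndexError = none (lookup, then write back at the same index)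
def pyPush? (res : List (List Int)) (L : Int) (v : Int) : Option (List (List Int)) :=
  (PySem.List.pyGet? res L).bind (fun cur => PySem.List.pySet? res L (cur ++ [v]))

-- innermost recursive call: `item` is a list of ints; ints are not Sized, so the guarded block
-- is skipped (and a level-0 call only rebinds the local name `res`): the caller's res object,
-- which is what the caller keeps using, is unchanged
def pyA1 (_item : List Int) (_level : Int) (res : List (List Int)) : List (List Int) :=
  res

-- recursive call on a 2-level node: returns the final state of the CALLER's res object.
def pyA2 (node : List (List Int)) (level : Int) (res : List (List Int)) : Option (List (List Int)) :=
  if level = 0 then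
    -- `if not level:` rebinds res to the fresh list [[len(node)]]; all further mutations hit that
    -- fresh list (and that fresh path cannot raise), so the caller's object is returned unchanged
    some res
  else
    -- `len(batch) and isinstance(batch[0], Sized) and not isinstance(batch[0], str)`:
    -- elements are lists, so the guard is exactly `node ≠ []`
    if node = [] then some res
    else
      node.foldlM (fun r item =>
        (pyPush? r (level + 1) ((item.length : Int))).map (fun r => pyA1 item (level + 1) r))
        (pyEnsure res (level + 1))

-- top-level body of _get_all_dimensions on a 3-level batch
def pyA3 (batch : List (List (List Int))) (level : Int) (res : List (List Int)) :
    Option (List (List Int)) :=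
  let res := if level = 0 then [[(batch.length : Int)]] else res
  if batch = [] then some res
  else
    batch.foldlM (fun r item =>
      (pyPush? r (level + 1) ((item.length : Int))).bind (fun r => pyA2 item (level + 1) r))
      (pyEnsure res (level + 1))

def get_all_dimensions_py (batch : List (List (List Int))) (level : Int)
    (res : Option (List (List Int))) : List (List Int) :=
  -- Python raises (TypeError on len(None)) or returns None when level ≠ 0 and res is None,
  -- and raises IndexError where pyPush? yields none: those inputs are outside Pre_
  (pyA3 batch level (res.getD [])).getD []

-- ===== PORT B =====

-- one while-iteration of B over a frontier of 2-level nodes: returns (res, nxt)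
def pyBlevel1 (frontier : List (List (List Int))) (lv : Int) (res : List (List Int)) :
    Option (List (List Int) × List (List Int)) :=
  frontier.foldlM (fun st node =>
      if node = [] then some st
      else
        node.foldlM (fun st item =>
            (pyPush? st.1 (lv + 1) ((item.length : Int))).map (fun r => (r, st.2 ++ [item])))
          (pyEnsure st.1 (lv + 1), st.2))
    (res, [])

-- one while-iteration of B over a frontier of 3-level nodes: returns (res, nxt)
def pyBlevel2 (frontier : List (List (List (List Int)))) (lv : Int) (res : List (List Int)) :
    Option (List (List Int) × List (List (List Int))) :=
  frontier.foldlM (fun st node =>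
      if node = [] then some st
      else
        node.foldlM (fun st item =>
            (pyPush? st.1 (lv + 1) ((item.length : Int))).map (fun r => (r, st.2 ++ [item])))
          (pyEnsure st.1 (lv + 1), st.2))
    (res, [])

def get_all_dimensions_py_alt (batch : List (List (List Int))) (level : Int)
    (res : Option (List (List Int))) : List (List Int) :=
  -- `while frontier:` unrolled — the frontier is type-homogeneous, one iteration per dimension
  match pyBlevel2 [batch] level (if level = 0 then [[(batch.length : Int)]] else res.getD []) with
  | none => []
  | some (res1, f1) =>
    if f1 = [] then res1
    else
      match pyBlevel1 f1 (level + 1) res1 with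
      | none => []
      | some (res2, _f2) =>
        -- next iteration: nodes of _f2 are lists of ints; ints are not Sized, so no node
        -- matches the guard, nxt = [] and the loop exits with res2 unchanged
        res2

-- ===== PRECONDITION & SPEC =====

-- level/res are private recursion state; the documented entry point is level = 0.  Pre_
-- excludes (i) the inputs where A raises (IndexError from res[level+1], TypeError on
-- len(None)) or returns None instead of a list, and (ii) two misuses of that private state
-- on which A's value is an accidental artefact that no caller exercises and neither value is
-- specified: level = -1 with a caller-supplied res and some nonempty item, where the
-- 'if not level' re-entry rebinds res to a fresh discarded list so the deeper sizes vanish,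
-- and level = -2 with a one-bucket res, where both dimensions alias into res[-1] = res[0]
-- and only the interleaving order distinguishes the traversals.
def Pre_get_all_dimensions_py (batch : List (List (List Int))) (level : Int)
    (res : Option (List (List Int))) : Prop :=
  level = 0 ∨ (res ≠ none ∧
    (batch = [] ∨
      ((-(((res.getD []).length : Nat) : Int) ≤ level + 1 ∧
        level + 1 ≤ (((res.getD []).length : Nat) : Int)) ∧
       ¬(level = -2 ∧ (res.getD []).length = 1) ∧
       ¬(level = -1 ∧ ∃ it ∈ batch, it ≠ []))))

instance (batch : List (List (List Int))) (level : Int) (res : Option (List (List Int))) :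
    Decidable (Pre_get_all_dimensions_py batch level res) := by
  unfold Pre_get_all_dimensions_py; infer_instance

def pvWitness_get_all_dimensions_py :
    List (List (List Int)) × Int × Option (List (List Int)) :=
  ([[[1], [2, 3]], [[4], [5, 6, 7], [8, 9]]], 0, none)

def Spec_get_all_dimensions_py (batch : List (List (List Int))) (level : Int)
    (res : Option (List (List Int))) (out : List (List Int)) : Prop :=
  out = get_all_dimensions_py_alt batch level res

instance (batch : List (List (List Int))) (level : Int) (res : Option (List (List Int)))
    (out : List (List Int)) : Decidable (Spec_get_all_dimensions_py batch level res out) := by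
  unfold Spec_get_all_dimensions_py; infer_instance

-- ===== CLAIM (what is proved, stated in full; the proofs are below) =====

def Claim_equal_get_all_dimensions_py : Prop := ∀ (batch : List (List (List Int))) (level : Int) (res : Option (List (List Int))), Dom_get_all_dimensions_py batch level res → Pre_get_all_dimensions_py batch level res → Spec_get_all_dimensions_py batch level res (get_all_dimensions_py batch level res)

-- ===== LEMMAS AND PROOFS =====

-- `res[p].append(v)` once the index is resolved to a plain position p
def pushAt (w : List (List Int)) (p : Nat) (v : Int) : List (List Int) :=
  w.set p ((w[p]?.getD []) ++ [v])

-- G2 L2 p2: the pure effect of A's recursive call / of B's second-phase body on one node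
def G2 (L2 : Int) (p2 : Nat) (r : List (List Int)) (node : List (List Int)) : List (List Int) :=
  if node = [] then r
  else node.foldl (fun w s => pushAt w p2 ((s.length : Int))) (pyEnsure r L2)

lemma length_pushAt (w : List (List Int)) (p : Nat) (v : Int) :
    (pushAt w p v).length = w.length := by
  simp [pushAt]

lemma pyIdx_neg (len : Nat) (L : Int) (hL : L < 0) (p : Nat)
    (hp : (len : Int) + L = (p : Int)) : PySem.List.pyIdx? len L = some p := by
  unfold PySem.List.pyIdx?
  split_ifs with h1 h2 h3 <;> [omega; omega; (congr 1; omega); omega]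

lemma pyPush?_nonneg (w : List (List Int)) (v : Int) (p : Nat) (hp : p < w.length) :
    pyPush? w ((p : Nat) : Int) v = some (pushAt w p v) := by
  unfold pyPush? pushAt
  rw [PySem.List.pyGet?_natCast, List.getElem?_eq_getElem hp]
  simp only [Option.bind_some]
  rw [PySem.List.pySet?_natCast (h := hp)]
  simp

lemma pyPush?_neg (w : List (List Int)) (v : Int) (L : Int) (hL : L < 0) (p : Nat)
    (hp : (w.length : Int) + L = (p : Int)) :
    pyPush? w L v = some (pushAt w p v) := by
  have hplt : p < w.length := by omega
  unfold pyPush? pushAt PySem.List.pyGet? PySem.List.pySet?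
  rw [pyIdx_neg _ _ hL _ hp]
  simp [List.getElem?_eq_getElem hplt]

lemma pushAt_comm (w : List (List Int)) (p q : Nat) (v u : Int) (hpq : p ≠ q) :
    pushAt (pushAt w p v) q u = pushAt (pushAt w q u) p v := by
  unfold pushAt
  rw [List.getElem?_set_ne (by omega), List.getElem?_set_ne (by omega)]
  exact List.set_comm _ _ hpq

lemma pushAt_append (w : List (List Int)) (x : List Int) (p : Nat) (v : Int)
    (hp : p < w.length) :
    pushAt (w ++ [x]) p v = pushAt w p v ++ [x] := by
  unfold pushAt
  rw [List.getElem?_append_left hp, List.set_append_left _ _ hp]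

lemma foldlM_eq_foldl {s a : Type} (P : s → Prop) (m : s → a → Option s) (h : s → a → s)
    (hstep : ∀ st x, P st → m st x = some (h st x) ∧ P (h st x)) :
    ∀ (xs : List a) (st : s), P st → xs.foldlM m st = some (xs.foldl h st)
  | [], st, _ => rfl
  | x :: t, st, hP => by
    rw [List.foldlM_cons, (hstep st x hP).1, List.foldl_cons]
    exact foldlM_eq_foldl P m h hstep t (h st x) (hstep st x hP).2

lemma foldl_P {s a : Type} (P : s → Prop) (h : s → a → s)
    (hP : ∀ st x, P st → P (h st x)) :
    ∀ (xs : List a) (st : s), P st → P (xs.foldl h st)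
  | [], _st, hst => hst
  | x :: t, st, hst => foldl_P P h hP t (h st x) (hP st x hst)

lemma foldl_pair_indep {s t a : Type} (f : s → a → s) (g : t → a → t) :
    ∀ (xs : List a) (st : s) (n : t),
      xs.foldl (fun st x => (f st.1 x, g st.2 x)) (st, n) = (xs.foldl f st, xs.foldl g n)
  | [], st, n => rfl
  | x :: xs, st, n => by
    rw [List.foldl_cons, List.foldl_cons, List.foldl_cons]
    exact foldl_pair_indep f g xs (f st x) (g n x)

lemma foldl_pull {s a : Type} (f g : s → a → s) (P : s → Prop)
    (hPf : ∀ st x, P st → P (f st x))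
    (hc : ∀ st x y, P st → f (g st x) y = g (f st y) x) :
    ∀ (xs : List a) (st : s) (x : a), P st → xs.foldl f (g st x) = g (xs.foldl f st) x
  | [], st, x, _ => rfl
  | y :: t, st, x, hP => by
    rw [List.foldl_cons, List.foldl_cons, hc st x y hP]
    exact foldl_pull f g P hPf hc t (f st y) x (hPf st y hP)

lemma foldl_fg {s a : Type} (f g : s → a → s) (P : s → Prop)
    (hPf : ∀ st x, P st → P (f st x)) (hPg : ∀ st x, P st → P (g st x))
    (hc : ∀ st x y, P st → f (g st x) y = g (f st y) x) :
    ∀ (xs : List a) (st : s), P st →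
      xs.foldl (fun st x => g (f st x) x) st = xs.foldl g (xs.foldl f st)
  | [], st, _ => rfl
  | x :: t, st, hP => by
    rw [List.foldl_cons, List.foldl_cons, List.foldl_cons]
    rw [foldl_fg f g P hPf hPg hc t (g (f st x) x) (hPg (f st x) x (hPf st x hP))]
    rw [foldl_pull f g P hPf hc t (f st x) x (hPf st x hP)]

-- commuting a level-1 push past the whole effect of one node at level 2
lemma pushAt_foldl_comm (p q : Nat) (hpq : p ≠ q) :
    ∀ (xs : List (List Int)) (w : List (List Int)) (v : Int),
      xs.foldl (fun w s => pushAt w q ((s.length : Int))) (pushAt w p v)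
        = pushAt (xs.foldl (fun w s => pushAt w q ((s.length : Int))) w) p v
  | [], w, v => rfl
  | x :: t, w, v => by
    rw [List.foldl_cons, List.foldl_cons, pushAt_comm w p q v _ hpq]
    exact pushAt_foldl_comm p q hpq t (pushAt w q ((x.length : Int))) v

lemma pushAt_pyEnsure (w : List (List Int)) (p : Nat) (v : Int) (L : Int)
    (hp : p < w.length) :
    pushAt (pyEnsure w L) p v = pyEnsure (pushAt w p v) L := by
  unfold pyEnsure
  rw [length_pushAt]
  split_ifs with h
  · exact pushAt_append w [] p v hp
  · rfl

lemma G2_comm (L2 : Int) (p1 p2 : Nat) (hpq : p1 ≠ p2)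
    (r : List (List Int)) (node : List (List Int)) (v : Int) (hp : p1 < r.length) :
    pushAt (G2 L2 p2 r node) p1 v = G2 L2 p2 (pushAt r p1 v) node := by
  unfold G2
  by_cases hn : node = []
  · simp [hn]
  · simp only [hn, if_false]
    rw [← pushAt_foldl_comm p1 p2 hpq node (pyEnsure r L2) v,
      pushAt_pyEnsure r p1 v L2 hp]

-- the effect of pyA2 (node, level L1 ≠ 0) is G2 (L1+1) p2, given a resolution package for L1+1
lemma pyA2_eq (L1 : Int) (hL1 : L1 ≠ 0) (p2 : Nat) (Inv P0 : List (List Int) → Prop)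
    (hres2 : ∀ w v, Inv w → pyPush? w (L1 + 1) v = some (pushAt w p2 v))
    (hpres2 : ∀ w v, Inv w → Inv (pushAt w p2 v))
    (hP0ens : ∀ w, P0 w → Inv (pyEnsure w (L1 + 1)))
    (node : List (List Int)) (r : List (List Int)) (hr : P0 r) :
    pyA2 node L1 r = some (G2 (L1 + 1) p2 r node) := by
  unfold pyA2 G2
  rw [if_neg hL1]
  by_cases hn : node = []
  · simp [hn]
  · simp only [hn, if_false]
    exact foldlM_eq_foldl Inv _ _
      (fun w it hw => ⟨by rw [hres2 w _ hw]; rfl, hpres2 w _ hw⟩)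
      node (pyEnsure r (L1 + 1)) (hP0ens r hr)

lemma pyBlevel2_single (level : Int) (batch : List (List (List Int))) (r : List (List Int))
    (hb : batch ≠ []) (p1 : Nat) (P0 : List (List Int) → Prop)
    (hres1 : ∀ w v, P0 w → pyPush? w (level + 1) v = some (pushAt w p1 v))
    (hpres1 : ∀ w v, P0 w → P0 (pushAt w p1 v))
    (hw0 : P0 (pyEnsure r (level + 1))) :
    pyBlevel2 [batch] level r =
      some (batch.foldl (fun w it => pushAt w p1 ((it.length : Int))) (pyEnsure r (level + 1)),
        batch) := by
  unfold pyBlevel2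
  rw [List.foldlM_cons]
  rw [if_neg hb]
  have := foldlM_eq_foldl (fun st : List (List Int) × List (List (List Int)) => P0 st.1)
    (fun st item => (pyPush? st.1 (level + 1) ((item.length : Int))).map (fun r => (r, st.2 ++ [item])))
    (fun st item => (pushAt st.1 p1 ((item.length : Int)), st.2 ++ [item]))
    (fun stp it hst => ⟨by dsimp only; rw [hres1 stp.1 _ hst]; rfl, hpres1 stp.1 _ hst⟩)
    batch (pyEnsure r (level + 1), []) hw0
  rw [this]
  have h2 := foldl_pair_indep (fun w it => pushAt w p1 ((it.length : Int)))
    (fun n it => n ++ [it]) batch (pyEnsure r (level + 1)) []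
  rw [h2, PySem.List.foldl_append_singleton]
  rfl

lemma pyBlevel1_eq (lv : Int) (p2 : Nat) (Inv P0 : List (List Int) → Prop)
    (hres2 : ∀ w v, Inv w → pyPush? w (lv + 1) v = some (pushAt w p2 v))
    (hpres2 : ∀ w v, Inv w → Inv (pushAt w p2 v))
    (hP0ens : ∀ w, P0 w → Inv (pyEnsure w (lv + 1)))
    (hInvP0 : ∀ w, Inv w → P0 w)
    (frontier : List (List (List Int))) (r : List (List Int)) (hr : P0 r) :
    pyBlevel1 frontier lv r =
      some (frontier.foldl (G2 (lv + 1) p2) r,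
        frontier.foldl (fun n node => n ++ node) []) := by
  unfold pyBlevel1
  have := foldlM_eq_foldl (fun st : List (List Int) × List (List Int) => P0 st.1)
    (fun st node =>
      if node = [] then some st
      else
        (node.foldlM (fun st item =>
            (pyPush? st.1 (lv + 1) ((item.length : Int))).map (fun r => (r, st.2 ++ [item])))
          (pyEnsure st.1 (lv + 1), st.2)))
    (fun st node => (G2 (lv + 1) p2 st.1 node, st.2 ++ node))
    (fun st node hst => ?step)
    frontier (r, []) hr
  · rw [this]
    rw [foldl_pair_indep (G2 (lv + 1) p2) (fun n node => n ++ node) frontier r []]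
  case step =>
    by_cases hn : node = []
    · subst hn
      refine ⟨by simp [G2], by simpa [G2] using hst⟩
    · constructor
      · simp only [if_neg hn]
        rw [foldlM_eq_foldl (fun st : List (List Int) × List (List Int) => Inv st.1)
          _
          (fun st item => (pushAt st.1 p2 ((item.length : Int)), st.2 ++ [item]))
          (fun st it hstI => ⟨by dsimp only; rw [hres2 st.1 _ hstI]; rfl, hpres2 st.1 _ hstI⟩)
          node (pyEnsure st.1 (lv + 1), st.2) (hP0ens st.1 hst)]
        have h2 := foldl_pair_indep (fun w it => pushAt w p2 ((it.length : Int)))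
          (fun n it => n ++ [it]) node (pyEnsure st.1 (lv + 1)) st.2
        rw [h2, PySem.List.foldl_append_singleton]
        simp [G2, hn]
      · dsimp only
        unfold G2
        simp only [if_neg hn]
        exact hInvP0 _ (foldl_P Inv _ (fun w it hw => hpres2 w _ hw) node _ (hP0ens st.1 hst))

-- the common core: A's interleaved DFS fold equals B's two phases, for batch ≠ [] and L1 ≠ 0,
-- given resolution packages for the two write levels
lemma AB_core (batch : List (List (List Int))) (level : Int) (res : Option (List (List Int)))
    (hb : batch ≠ []) (hL1 : level + 1 ≠ 0)
    (p1 p2 : Nat) (hpq : p1 ≠ p2) (P0 Inv : List (List Int) → Prop)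
    (hres1 : ∀ w v, P0 w → pyPush? w (level + 1) v = some (pushAt w p1 v))
    (hpres1 : ∀ w v, P0 w → P0 (pushAt w p1 v))
    (hres2 : ∀ w v, Inv w → pyPush? w ((level + 1) + 1) v = some (pushAt w p2 v))
    (hpres2 : ∀ w v, Inv w → Inv (pushAt w p2 v))
    (hP0ens : ∀ w, P0 w → Inv (pyEnsure w ((level + 1) + 1)))
    (hInvP0 : ∀ w, Inv w → P0 w)
    (hp1P0 : ∀ w, P0 w → p1 < w.length)
    (hw0 : P0 (pyEnsure (if level = 0 then [[(batch.length : Int)]] else res.getD [])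
      (level + 1))) :
    get_all_dimensions_py batch level res = get_all_dimensions_py_alt batch level res := by
  have hPg : ∀ w node, P0 w → P0 (G2 ((level + 1) + 1) p2 w node) := by
    intro w node hw
    unfold G2
    by_cases hn : node = []
    · simpa [hn]
    · rw [if_neg hn]
      exact hInvP0 _ (foldl_P Inv _ (fun w it hw => hpres2 w _ hw) node _ (hP0ens w hw))
  have hc : ∀ w (a : List (List Int)) (b : List (List Int)), P0 w →
      pushAt (G2 ((level + 1) + 1) p2 w a) p1 ((b.length : Int))
        = G2 ((level + 1) + 1) p2 (pushAt w p1 ((b.length : Int))) a := by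
    intro w a b hw
    exact G2_comm _ p1 p2 hpq w a _ (hp1P0 w hw)
  set r' := (if level = 0 then [[(batch.length : Int)]] else res.getD []) with hr'
  -- A side
  have hA : pyA3 batch level (res.getD []) =
      some (batch.foldl
        (fun w it => G2 ((level + 1) + 1) p2 (pushAt w p1 ((it.length : Int))) it)
        (pyEnsure r' (level + 1))) := by
    unfold pyA3
    rw [← hr', if_neg hb]
    exact foldlM_eq_foldl P0 _ _
      (fun w it hw => by
        constructor
        · dsimp only
          rw [hres1 w _ hw]
          simp only [Option.bind_some]
          exact pyA2_eq (level + 1) hL1 p2 Inv P0 hres2 hpres2 hP0ens it _ (hpres1 w _ hw)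
        · exact hPg _ it (hpres1 w _ hw))
      batch (pyEnsure r' (level + 1)) hw0
  -- B side
  have hB : get_all_dimensions_py_alt batch level res =
      batch.foldl (G2 ((level + 1) + 1) p2)
        (batch.foldl (fun w it => pushAt w p1 ((it.length : Int))) (pyEnsure r' (level + 1))) := by
    unfold get_all_dimensions_py_alt
    rw [← hr']
    rw [pyBlevel2_single level batch r' hb p1 P0 hres1 hpres1 hw0]
    simp only [if_neg hb]
    rw [pyBlevel1_eq (level + 1) p2 Inv P0 hres2 hpres2 hP0ens hInvP0 batch _
      (foldl_P P0 _ (fun w it hw => hpres1 w _ hw) batch _ hw0)]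
  unfold get_all_dimensions_py
  rw [hA, hB, Option.getD_some]
  exact foldl_fg _ _ P0 (fun w it hw => hpres1 w _ hw) hPg hc batch _ hw0

-- positive write level: 1 ≤ level+1 ≤ len(res'), indices are plain positions p1 and p1+1
lemma main_pos (batch : List (List (List Int))) (level : Int) (res : Option (List (List Int)))
    (hb : batch ≠ []) (p1 : Nat) (h1 : 1 ≤ p1) (hl : level + 1 = ((p1 : Nat) : Int))
    (hle : p1 ≤ (if level = 0 then [[(batch.length : Int)]] else res.getD []).length) :
    get_all_dimensions_py batch level res = get_all_dimensions_py_alt batch level res := by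
  have hL1 : level + 1 ≠ 0 := by omega
  refine AB_core batch level res hb hL1 p1 (p1 + 1) (by omega)
    (fun w => p1 < w.length) (fun w => p1 + 1 < w.length)
    (fun w v hw => by rw [hl]; exact pyPush?_nonneg w v p1 hw)
    (fun w v hw => by simp only [length_pushAt]; exact hw)
    (fun w v hw => by
      have : (level + 1) + 1 = (((p1 + 1 : Nat)) : Int) := by push_cast; omega
      rw [this]; exact pyPush?_nonneg w v (p1 + 1) hw)
    (fun w v hw => by simp only [length_pushAt]; exact hw)
    (fun w hw => by
      have hw' : p1 < w.length := hw
      show p1 + 1 < (pyEnsure w ((level + 1) + 1)).length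
      unfold pyEnsure
      split_ifs with h
      · simp only [List.length_append, List.length_cons, List.length_nil]; omega
      · omega)
    (fun w hw => by
      have hw' : p1 + 1 < w.length := hw
      show p1 < w.length
      omega)
    (fun w hw => hw)
    ?_
  show p1 < (pyEnsure (if level = 0 then [[(batch.length : Int)]] else res.getD [])
    (level + 1)).length
  set r' := (if level = 0 then [[(batch.length : Int)]] else res.getD []) with hrdef
  unfold pyEnsure
  split_ifs with h
  · simp only [List.length_append, List.length_cons, List.length_nil]; omega
  · omega

-- negative write level: -len(res') ≤ level+1 ≤ -1, indices wrap from the end and (as no append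
-- can fire) the length stays constant
lemma main_neg (batch : List (List (List Int))) (level : Int) (res : Option (List (List Int)))
    (hb : batch ≠ []) (hL1 : level + 1 ≤ -1)
    (hge : -(((res.getD []).length : Nat) : Int) ≤ level + 1)
    (hcorner : level = -2 → 2 ≤ (res.getD []).length) :
    get_all_dimensions_py batch level res = get_all_dimensions_py_alt batch level res := by
  have hlne : level ≠ 0 := by omega
  have hn1 : 1 ≤ (res.getD []).length := by omega
  set n0 := (res.getD []).length with hn0
  obtain ⟨p1, hp1⟩ : ∃ p1 : Nat, ((p1 : Nat) : Int) = (n0 : Int) + (level + 1) :=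
    ⟨((n0 : Int) + (level + 1)).toNat, by omega⟩
  have hr' : (if level = 0 then [[(batch.length : Int)]] else res.getD []) = res.getD [] := by
    rw [if_neg hlne]
  have hens : ∀ w : List (List Int), w.length = n0 → ∀ L : Int, L ≤ 0 →
      (pyEnsure w L).length = n0 := by
    intro w hw L hL
    unfold pyEnsure
    rw [if_neg (by omega)]
    exact hw
  refine AB_core batch level res hb (by omega) p1
    (if level = -2 then 0 else p1 + 1)
    (by split_ifs with h2 <;> omega)
    (fun w => w.length = n0) (fun w => w.length = n0)
    (fun w v hw => pyPush?_neg w v (level + 1) (by omega) p1 (by omega))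
    (fun w v hw => by simp only [length_pushAt]; exact hw)
    (fun w v hw => by
      split_ifs with h2
      · have h0 : (level + 1) + 1 = (((0 : Nat)) : Int) := by omega
        rw [h0]
        exact pyPush?_nonneg w v 0 (by omega)
      · exact pyPush?_neg w v ((level + 1) + 1) (by omega) (p1 + 1) (by omega))
    (fun w v hw => by simp only [length_pushAt]; exact hw)
    (fun w hw => hens w hw _ (by omega))
    (fun w hw => hw)
    (fun w hw => by omega)
    (by rw [hr']; exact hens _ rfl _ (by omega))

-- frontier of empty nodes: the phase does nothing
lemma pyBlevel1_empty (lv : Int) :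
    ∀ (frontier : List (List (List Int))) (st : List (List Int) × List (List Int)),
      (∀ node ∈ frontier, node = []) →
      frontier.foldlM (fun st node =>
          if node = [] then some st
          else
            node.foldlM (fun st item =>
                (pyPush? st.1 (lv + 1) ((item.length : Int))).map (fun r => (r, st.2 ++ [item])))
              (pyEnsure st.1 (lv + 1), st.2)) st = some st
  | [], st, _ => rfl
  | n :: t, st, h => by
    rw [List.foldlM_cons, if_pos (h n (by simp))]
    show t.foldlM _ st = some st
    exact pyBlevel1_empty lv t st (fun node hm => h node (by simp [hm]))

-- level = -1: the recursion re-enters at level 0 and contributes nothing; inside Pre_ every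
-- item is empty, so B's second phase does nothing either
lemma main_m1 (batch : List (List (List Int))) (res : Option (List (List Int)))
    (hb : batch ≠ []) (hall : ∀ it ∈ batch, it = []) :
    get_all_dimensions_py batch (-1) res = get_all_dimensions_py_alt batch (-1) res := by
  have hr' : (if (-1 : Int) = 0 then [[(batch.length : Int)]] else res.getD []) = res.getD [] := by
    norm_num
  have hw0 : 0 < (pyEnsure (res.getD []) (-1 + 1)).length := by
    unfold pyEnsure
    split_ifs with h
    · simp only [List.length_append, List.length_cons, List.length_nil]; omega
    · omega
  have hres1 : ∀ (w : List (List Int)) (v : Int), 0 < w.length →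
      pyPush? w (-1 + 1) v = some (pushAt w 0 v) := by
    intro w v hw
    have h0 : (-1 : Int) + 1 = (((0 : Nat)) : Int) := by omega
    rw [h0]
    exact pyPush?_nonneg w v 0 hw
  -- A side
  have hA : get_all_dimensions_py batch (-1) res =
      batch.foldl (fun w it => pushAt w 0 ((it.length : Int)))
        (pyEnsure (res.getD []) (-1 + 1)) := by
    unfold get_all_dimensions_py pyA3
    rw [hr', if_neg hb]
    rw [foldlM_eq_foldl (fun w : List (List Int) => 0 < w.length) _
      (fun w it => pushAt w 0 ((it.length : Int)))
      (fun w it hw => by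
        constructor
        · dsimp only
          rw [hres1 w _ hw, Option.bind_some]
          unfold pyA2
          norm_num
        · simp only [length_pushAt]; exact hw)
      batch _ hw0]
    rfl
  -- B side
  have hB : get_all_dimensions_py_alt batch (-1) res =
      batch.foldl (fun w it => pushAt w 0 ((it.length : Int)))
        (pyEnsure (res.getD []) (-1 + 1)) := by
    unfold get_all_dimensions_py_alt
    rw [hr']
    rw [pyBlevel2_single (-1) batch (res.getD []) hb 0 (fun w => 0 < w.length)
      hres1 (fun w v hw => by simp only [length_pushAt]; exact hw) hw0]
    simp only [if_neg hb]
    unfold pyBlevel1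
    rw [pyBlevel1_empty (-1 + 1) batch _ hall]
  rw [hA, hB]

-- ===== VERDICT (by name: the statement is the Claim_ definition above) =====
theorem get_all_dimensions_py_spec : Claim_equal_get_all_dimensions_py := by
  intro batch level res hdom hpre
  show get_all_dimensions_py batch level res = get_all_dimensions_py_alt batch level res
  by_cases hb : batch = []
  · subst hb
    rfl
  · by_cases hl0 : level = 0
    · subst hl0
      exact main_pos batch 0 res hb 1 (by omega) (by norm_num) (by norm_num)
    · rcases hpre with h0 | ⟨hsome, hrest⟩
      · exact absurd h0 hl0
      rcases hrest with h' | ⟨⟨hge, hle⟩, hcorner2, hcorner1⟩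
      · exact absurd h' hb
      by_cases hm1 : level = -1
      · subst hm1
        have hall : ∀ it ∈ batch, it = [] := by
          intro it hit
          by_contra hne
          exact hcorner1 ⟨rfl, it, hit, hne⟩
        exact main_m1 batch res hb hall
      · by_cases hneg : level + 1 < 0
        · exact main_neg batch level res hb (by omega) hge (fun h2 => by
            subst h2
            rcases Nat.lt_or_ge (res.getD []).length 2 with h | h
            · exact absurd ⟨rfl, by omega⟩ hcorner2
            · exact h)
        · have h1 : 1 ≤ level + 1 := by omega
          exact main_pos batch level res hb (level + 1).toNat (by omega) (by omega)
            (by rw [if_neg hl0]; omega)
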